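-- pv_equiv track=rewrite | github.com/daconrilcy/horoscope_front | backend/app/services/chart_json_builder.py | _get_evidence_priority
-- ===== SOURCE A (Python) =====
-- def _get_evidence_priority(eid: str) -> int:
--     """Helper to determine sorting priority for evidence IDs."""
--     # Priority 0: Luminaries and Angles
--     if any(eid.startswith(p) for p in ["SUN_", "MOON_", "ASC_", "MC_", "IC_", "DSC_"]):
--         return 0
--     # Priority 1: Positions (Signs, Houses, Retrograde)
--     planets = [
--         "MERCURY_",
--         "VENUS_",
--         "MARS_",
--         "JUPITER_",
--         "SATURN_",
--         "URANUS_",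
--         "NEPTUNE_",
--         "PLUTO_",
--         "CHIRON_",
--         "LILITH_",
--         "NODE_",
--     ]
--     if any(eid.startswith(p) for p in planets):
--         return 1
--     # Priority 2: Aspects
--     if eid.startswith("ASPECT_"):
--         return 2
--     # Priority 3: Others (House cusps in signs, etc.)
--     return 3
-- ===== SOURCE B (Python) =====
-- _PRIORITY = {
--     "SUN_": 0, "MOON_": 0, "ASC_": 0, "MC_": 0, "IC_": 0, "DSC_": 0,
--     "MERCURY_": 1, "VENUS_": 1, "MARS_": 1, "JUPITER_": 1, "SATURN_": 1,
--     "URANUS_": 1, "NEPTUNE_": 1, "PLUTO_": 1, "CHIRON_": 1, "LILITH_": 1,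
--     "NODE_": 1,
--     "ASPECT_": 2,
-- }
--
--
-- def _get_evidence_priority(eid: str) -> int:
--     """Helper to determine sorting priority for evidence IDs."""
--     i = eid.find("_")
--     if i == -1:
--         return 3
--     return _PRIORITY.get(eid[: i + 1], 3)
-- ===== Notes on version B (the rewrite author's own statement) =====
-- stated objective: idiomatic
-- what changed: Replaces A's three ordered any(startswith(...)) scans over 18 prefixes by a single module-level dict keyed on the full prefix (the segment up to and including the first underscore), looked up once with default 3.
import Mathlib
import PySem

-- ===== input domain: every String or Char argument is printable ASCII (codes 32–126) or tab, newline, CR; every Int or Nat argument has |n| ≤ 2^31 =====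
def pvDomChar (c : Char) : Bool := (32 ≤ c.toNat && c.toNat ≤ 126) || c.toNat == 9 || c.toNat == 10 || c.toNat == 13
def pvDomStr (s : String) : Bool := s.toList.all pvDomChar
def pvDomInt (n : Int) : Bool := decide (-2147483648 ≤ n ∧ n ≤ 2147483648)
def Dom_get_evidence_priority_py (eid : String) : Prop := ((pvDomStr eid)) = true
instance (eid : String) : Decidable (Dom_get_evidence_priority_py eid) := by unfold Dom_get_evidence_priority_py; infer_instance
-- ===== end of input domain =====

-- B replaces A's three ordered any(startswith(...)) scans by one prefix-table lookup keyed on the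
-- segment up to and including the first underscore (objective: idiomatic).

-- ===== PORT A =====
def get_evidence_priority_py (eid : String) : Int :=
  if (["SUN_", "MOON_", "ASC_", "MC_", "IC_", "DSC_"].any fun p => PySem.Str.startswith eid p) then 0
  else
    let planets := ["MERCURY_", "VENUS_", "MARS_", "JUPITER_", "SATURN_", "URANUS_",
                    "NEPTUNE_", "PLUTO_", "CHIRON_", "LILITH_", "NODE_"]
    if (planets.any fun p => PySem.Str.startswith eid p) then 1
    else if PySem.Str.startswith eid "ASPECT_" then 2
    else 3

-- ===== PORT B =====
def pvPriorityDict : PySem.Dict String Int :=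
  PySem.Dict.ofList [("SUN_", 0), ("MOON_", 0), ("ASC_", 0), ("MC_", 0), ("IC_", 0), ("DSC_", 0),
    ("MERCURY_", 1), ("VENUS_", 1), ("MARS_", 1), ("JUPITER_", 1), ("SATURN_", 1),
    ("URANUS_", 1), ("NEPTUNE_", 1), ("PLUTO_", 1), ("CHIRON_", 1), ("LILITH_", 1),
    ("NODE_", 1), ("ASPECT_", 2)]

def get_evidence_priority_py_alt (eid : String) : Int :=
  let i := PySem.Str.find eid "_"
  if i = -1 then 3
  else pvPriorityDict.getD (PySem.Str.slice eid none (some (i + 1))) 3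

-- ===== PRECONDITION & SPEC =====
def Spec_get_evidence_priority_py (eid : String) (out : Int) : Prop := out = get_evidence_priority_py_alt eid
instance (eid : String) (out : Int) : Decidable (Spec_get_evidence_priority_py eid out) := by unfold Spec_get_evidence_priority_py; infer_instance

-- ===== CLAIM (what is proved, stated in full; the proofs are below) =====
def Claim_equal_get_evidence_priority_py : Prop := ∀ (eid : String), Dom_get_evidence_priority_py eid → Spec_get_evidence_priority_py eid (get_evidence_priority_py eid)

-- ===== LEMMAS AND PROOFS =====

-- a singleton list is a prefix of l iff l's first element is that character
theorem pv_singleton_prefix (c : Char) (l : List Char) : [c] <+: l ↔ l.head? = some c := by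
  cases l with
  | nil => simp
  | cons a t =>
    constructor
    · rintro ⟨s, hs⟩; simp at hs; simp [hs.1]
    · intro h; simp at h; exact ⟨t, by simp [h]⟩

-- if cs contains no underscore, no string ending in '_' is a prefix of cs
theorem pv_no_underscore_no_prefix (cs q : List Char)
    (hfind : PySem.Chars.find cs ['_'] = -1) : ¬ (q ++ ['_']) <+: cs := by
  intro h
  have hinf : ['_'] <:+: cs :=
    List.IsInfix.trans (by exact ⟨q, [], by simp⟩) h.isInfix
  exact (PySem.Chars.find_eq_neg_one_iff cs ['_']).mp hfind hinf

-- with the first underscore of cs at index j, a candidate q++"_" ('_' ∉ q) is a prefix of cs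
-- exactly when it equals cs.take (j+1)
theorem pv_key_iff (cs q : List Char) (j : Nat) (hq : '_' ∉ q)
    (hj : PySem.Chars.find cs ['_'] = (j : Int)) :
    ((q ++ ['_']) <+: cs) ↔ cs.take (j + 1) = q ++ ['_'] := by
  have hnn : 0 ≤ PySem.Chars.find cs ['_'] := by omega
  have hspec := PySem.Chars.find_spec (s := cs) (sub := ['_']) hnn
  rw [hj] at hspec
  simp only [Int.toNat_natCast] at hspec
  obtain ⟨hpre, hmin⟩ := hspec
  have hjlen : j < cs.length := by
    rcases hpre with ⟨s, hs⟩
    have := congrArg List.length hs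
    simp at this
    omega
  constructor
  · intro h
    -- first, j = q.length
    have hql : q.length = j := by
      by_contra hne
      rcases Nat.lt_or_ge q.length j with hlt | hge
      · -- '_' occurs earlier than j : contradiction with minimality
        apply hmin q.length hlt
        rw [pv_singleton_prefix]
        rcases h with ⟨s, hs⟩
        rw [← hs, List.head?_drop]
        simp
      · have hgt : j < q.length := by omega
        -- cs[j] = '_' but cs[j] = q[j], and '_' ∉ q
        apply hq
        have hcj : cs[j]? = some '_' := by
          rw [pv_singleton_prefix] at hpre
          rwa [List.head?_drop] at hpre
        rcases h with ⟨s, hs⟩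
        rw [← hs] at hcj
        rw [List.getElem?_append_left (by simp; omega), List.getElem?_append_left hgt] at hcj
        exact List.mem_of_getElem? hcj
    have hlen : j + 1 ≤ cs.length := by omega
    rcases h with ⟨s, hs⟩
    rw [← hs, List.take_append_of_le_length (by simp; omega)]
    simp [hql]
  · intro h
    rw [← h]
    exact List.take_prefix _ _

set_option maxRecDepth 4096 in
-- the if-chain of A over t = cs.take (j+1) equals B's table lookup on the same segment
theorem pv_chain_eq (t : List Char) :
    (if t = "SUN_".toList ∨ t = "MOON_".toList ∨ t = "ASC_".toList ∨ t = "MC_".toList ∨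
        t = "IC_".toList ∨ t = "DSC_".toList then (0 : Int)
     else if t = "MERCURY_".toList ∨ t = "VENUS_".toList ∨ t = "MARS_".toList ∨
        t = "JUPITER_".toList ∨ t = "SATURN_".toList ∨ t = "URANUS_".toList ∨
        t = "NEPTUNE_".toList ∨ t = "PLUTO_".toList ∨ t = "CHIRON_".toList ∨
        t = "LILITH_".toList ∨ t = "NODE_".toList then 1
     else if t = "ASPECT_".toList then 2 else 3)
    = pvPriorityDict.getD (String.ofList t) 3 := by
  have hmk : ∀ s : String, (s = String.ofList t) ↔ t = s.toList := by
    intro s; constructor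
    · intro h; rw [h, String.toList_ofList]
    · intro h; rw [h, String.ofList_toList]
  have hitems : pvPriorityDict.items = [("SUN_", (0:Int)), ("MOON_", 0), ("ASC_", 0), ("MC_", 0), ("IC_", 0), ("DSC_", 0),
    ("MERCURY_", 1), ("VENUS_", 1), ("MARS_", 1), ("JUPITER_", 1), ("SATURN_", 1),
    ("URANUS_", 1), ("NEPTUNE_", 1), ("PLUTO_", 1), ("CHIRON_", 1), ("LILITH_", 1),
    ("NODE_", 1), ("ASPECT_", 2)] := by decide
  simp only [PySem.Dict.getD, PySem.Dict.get?, hitems]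
  split_ifs with h0 h1 h2
  · rcases h0 with h|h|h|h|h|h <;> subst h <;> decide
  · rcases h1 with h|h|h|h|h|h|h|h|h|h|h <;> subst h <;> decide
  · subst h2; decide
  · push Not at h0 h1
    have hb : ∀ s : String, t ≠ s.toList → (s == String.ofList t) = false := by
      intro s hne
      rw [beq_eq_false_iff_ne]
      intro hc
      exact hne ((hmk s).mp hc)
    simp only [List.find?_cons, hb "SUN_" h0.1, hb "MOON_" h0.2.1, hb "ASC_" h0.2.2.1, hb "MC_" h0.2.2.2.1, hb "IC_" h0.2.2.2.2.1, hb "DSC_" h0.2.2.2.2.2, hb "MERCURY_" h1.1, hb "VENUS_" h1.2.1, hb "MARS_" h1.2.2.1, hb "JUPITER_" h1.2.2.2.1, hb "SATURN_" h1.2.2.2.2.1, hb "URANUS_" h1.2.2.2.2.2.1, hb "NEPTUNE_" h1.2.2.2.2.2.2.1, hb "PLUTO_" h1.2.2.2.2.2.2.2.1, hb "CHIRON_" h1.2.2.2.2.2.2.2.2.1, hb "LILITH_" h1.2.2.2.2.2.2.2.2.2.1, hb "NODE_" h1.2.2.2.2.2.2.2.2.2.2, hb "ASPECT_" h2, List.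find?_nil]
    rfl

theorem get_evidence_priority_py_spec : Claim_equal_get_evidence_priority_py := by
  intro eid _
  unfold Spec_get_evidence_priority_py
  by_cases hneg : PySem.Chars.find eid.toList "_".toList = -1
  · -- no underscore: both sides give 3
    have hsw : ∀ q : List Char, PySem.Chars.startswith eid.toList (q ++ ['_']) = false := by
      intro q
      rw [← Bool.not_eq_true, PySem.Chars.startswith_iff]
      exact pv_no_underscore_no_prefix eid.toList q hneg
    have hfSUN : PySem.Chars.startswith eid.toList ['S','U','N','_'] = false := hsw ['S','U','N']
    have hfMOON : PySem.Chars.startswith eid.toList ['M','O','O','N','_'] = false := hsw ['M','O','O','N']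
    have hfASC : PySem.Chars.startswith eid.toList ['A','S','C','_'] = false := hsw ['A','S','C']
    have hfMC : PySem.Chars.startswith eid.toList ['M','C','_'] = false := hsw ['M','C']
    have hfIC : PySem.Chars.startswith eid.toList ['I','C','_'] = false := hsw ['I','C']
    have hfDSC : PySem.Chars.startswith eid.toList ['D','S','C','_'] = false := hsw ['D','S','C']
    have hfMERCURY : PySem.Chars.startswith eid.toList ['M','E','R','C','U','R','Y','_'] = false := hsw ['M','E','R','C','U','R','Y']
    have hfVENUS : PySem.Chars.startswith eid.toList ['V','E','N','U','S','_'] = false := hsw ['V','E','N','U','S']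
    have hfMARS : PySem.Chars.startswith eid.toList ['M','A','R','S','_'] = false := hsw ['M','A','R','S']
    have hfJUPITER : PySem.Chars.startswith eid.toList ['J','U','P','I','T','E','R','_'] = false := hsw ['J','U','P','I','T','E','R']
    have hfSATURN : PySem.Chars.startswith eid.toList ['S','A','T','U','R','N','_'] = false := hsw ['S','A','T','U','R','N']
    have hfURANUS : PySem.Chars.startswith eid.toList ['U','R','A','N','U','S','_'] = false := hsw ['U','R','A','N','U','S']
    have hfNEPTUNE : PySem.Chars.startswith eid.toList ['N','E','P','T','U','N','E','_'] = false := hsw ['N','E','P','T','U','N','E']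
    have hfPLUTO : PySem.Chars.startswith eid.toList ['P','L','U','T','O','_'] = false := hsw ['P','L','U','T','O']
    have hfCHIRON : PySem.Chars.startswith eid.toList ['C','H','I','R','O','N','_'] = false := hsw ['C','H','I','R','O','N']
    have hfLILITH : PySem.Chars.startswith eid.toList ['L','I','L','I','T','H','_'] = false := hsw ['L','I','L','I','T','H']
    have hfNODE : PySem.Chars.startswith eid.toList ['N','O','D','E','_'] = false := hsw ['N','O','D','E']
    have hfASPECT : PySem.Chars.startswith eid.toList ['A','S','P','E','C','T','_'] = false := hsw ['A','S','P','E','C','T']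
    simp [get_evidence_priority_py, get_evidence_priority_py_alt, hfSUN, hfMOON, hfASC, hfMC, hfIC, hfDSC, hfMERCURY, hfVENUS, hfMARS, hfJUPITER, hfSATURN, hfURANUS, hfNEPTUNE, hfPLUTO, hfCHIRON, hfLILITH, hfNODE, hfASPECT]
    intro h
    exact absurd hneg h
  · -- first underscore at index j
    have hnn : 0 ≤ PySem.Chars.find eid.toList "_".toList := by
      have := PySem.Chars.neg_one_le_find eid.toList "_".toList
      omega
    obtain ⟨j, hj⟩ : ∃ j : Nat, PySem.Chars.find eid.toList "_".toList = (j : Int) :=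
      ⟨(PySem.Chars.find eid.toList "_".toList).toNat, (Int.toNat_of_nonneg hnn).symm⟩
    have hsw : ∀ q : List Char, '_' ∉ q →
        (PySem.Chars.startswith eid.toList (q ++ ['_']) = true ↔
          eid.toList.take (j + 1) = q ++ ['_']) := by
      intro q hq
      rw [PySem.Chars.startswith_iff]
      exact pv_key_iff eid.toList q j hq hj
    have hiSUN : PySem.Chars.startswith eid.toList "SUN_".toList = true ↔ eid.toList.take (j+1) = "SUN_".toList := hsw "SUN".toList (by decide)
    have hiMOON : PySem.Chars.startswith eid.toList "MOON_".toList = true ↔ eid.toList.take (j+1) = "MOON_".toList := hsw "MOON".toList (by decide)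
    have hiASC : PySem.Chars.startswith eid.toList "ASC_".toList = true ↔ eid.toList.take (j+1) = "ASC_".toList := hsw "ASC".toList (by decide)
    have hiMC : PySem.Chars.startswith eid.toList "MC_".toList = true ↔ eid.toList.take (j+1) = "MC_".toList := hsw "MC".toList (by decide)
    have hiIC : PySem.Chars.startswith eid.toList "IC_".toList = true ↔ eid.toList.take (j+1) = "IC_".toList := hsw "IC".toList (by decide)
    have hiDSC : PySem.Chars.startswith eid.toList "DSC_".toList = true ↔ eid.toList.take (j+1) = "DSC_".toList := hsw "DSC".toList (by decide)
    have hiMERCURY : PySem.Chars.startswith eid.toList "MERCURY_".toList = true ↔ eid.toList.take (j+1) = "MERCURY_".toList := hsw "MERCURY".toList (by decide)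
    have hiVENUS : PySem.Chars.startswith eid.toList "VENUS_".toList = true ↔ eid.toList.take (j+1) = "VENUS_".toList := hsw "VENUS".toList (by decide)
    have hiMARS : PySem.Chars.startswith eid.toList "MARS_".toList = true ↔ eid.toList.take (j+1) = "MARS_".toList := hsw "MARS".toList (by decide)
    have hiJUPITER : PySem.Chars.startswith eid.toList "JUPITER_".toList = true ↔ eid.toList.take (j+1) = "JUPITER_".toList := hsw "JUPITER".toList (by decide)
    have hiSATURN : PySem.Chars.startswith eid.toList "SATURN_".toList = true ↔ eid.toList.take (j+1) = "SATURN_".toList := hsw "SATURN".toList (by decide)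
    have hiURANUS : PySem.Chars.startswith eid.toList "URANUS_".toList = true ↔ eid.toList.take (j+1) = "URANUS_".toList := hsw "URANUS".toList (by decide)
    have hiNEPTUNE : PySem.Chars.startswith eid.toList "NEPTUNE_".toList = true ↔ eid.toList.take (j+1) = "NEPTUNE_".toList := hsw "NEPTUNE".toList (by decide)
    have hiPLUTO : PySem.Chars.startswith eid.toList "PLUTO_".toList = true ↔ eid.toList.take (j+1) = "PLUTO_".toList := hsw "PLUTO".toList (by decide)
    have hiCHIRON : PySem.Chars.startswith eid.toList "CHIRON_".toList = true ↔ eid.toList.take (j+1) = "CHIRON_".toList := hsw "CHIRON".toList (by decide)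
    have hiLILITH : PySem.Chars.startswith eid.toList "LILITH_".toList = true ↔ eid.toList.take (j+1) = "LILITH_".toList := hsw "LILITH".toList (by decide)
    have hiNODE : PySem.Chars.startswith eid.toList "NODE_".toList = true ↔ eid.toList.take (j+1) = "NODE_".toList := hsw "NODE".toList (by decide)
    have hiASPECT : PySem.Chars.startswith eid.toList "ASPECT_".toList = true ↔ eid.toList.take (j+1) = "ASPECT_".toList := hsw "ASPECT".toList (by decide)
    have hslice : PySem.Str.slice eid none (some ((j : Int) + 1)) =
        String.ofList (eid.toList.take (j + 1)) := by
      rw [← String.ofList_toList (s := PySem.Str.slice eid none (some ((j : Int) + 1)))]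
      congr 1
      rw [PySem.Str.toList_slice, PySem.Chars.slice_eq_listSlice]
      have : ((j : Int) + 1) = ((j + 1 : Nat) : Int) := by push_cast; ring
      rw [this, PySem.List.slice_to_natCast]
    have hA : get_evidence_priority_py eid =
        pvPriorityDict.getD (String.ofList (eid.toList.take (j + 1))) 3 := by
      rw [← pv_chain_eq]
      simp only [get_evidence_priority_py, PySem.Str.startswith_eq, List.any_cons,
        List.any_nil, Bool.or_eq_true, Bool.false_eq_true, or_false, hiSUN, hiMOON, hiASC, hiMC, hiIC, hiDSC, hiMERCURY, hiVENUS, hiMARS, hiJUPITER, hiSATURN, hiURANUS, hiNEPTUNE, hiPLUTO, hiCHIRON, hiLILITH, hiNODE, hiASPECT]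
    have hB : get_evidence_priority_py_alt eid =
        pvPriorityDict.getD (String.ofList (eid.toList.take (j + 1))) 3 := by
      simp only [get_evidence_priority_py_alt, PySem.Str.find_eq, hj]
      rw [if_neg (by omega), hslice]
    rw [hA, hB]
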